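-- pv_equiv track=rewrite | github.com/Raden04/Sistem-Pakar-penyakit-jagung | Sistem_Pakar_Penyakit Jagung.py | forward_chaining
-- ===== SOURCE A (Python) =====
-- diseases = {
--     "P001": "Bulai",
--     "P002": "Blight",
--     "P003": "Leaf Rust",
--     "P004": "Burn",
--     "P005": "Stem Borer",
--     "P006": "Cob Borer"
-- }
--
-- rules = {
--     "P001": ["G1", "G2", "G3", "G4", "G5"],
--     "P002": ["G6", "G7", "G8", "G9", "G10"],
--     "P003": ["G10", "G11", "G12", "G13", "G14"],
--     "P004": ["G15", "G16", "G17", "G18", "G19"],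
--     "P005": ["G20", "G21", "G22", "G23", "G24", "G25", "G26", "G27"],
--     "P006": ["G28", "G29", "G30", "G31"]
-- }
--
-- def forward_chaining(selected_symptoms):
--     possible_diseases = []
--     for disease, disease_symptoms in rules.items():
--         match_count = sum(1 for symptom in selected_symptoms if symptom in disease_symptoms)
--         if match_count >= 3:
--             possible_diseases.append(diseases[disease])
--     if possible_diseases:
--         return ", ".join(possible_diseases)
--     return "No disease matches the given symptoms"
-- ===== SOURCE B (Python) =====
-- def forward_chaining(selected_symptoms):
--     # Rules/diseases are fixed module constants, so the matcher is "compiled"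
--     # into a single pass keeping one integer counter per disease (G10 is the
--     # only symptom shared by two rules).
--     c1 = c2 = c3 = c4 = c5 = c6 = 0
--     for s in selected_symptoms:
--         if s in ("G1", "G2", "G3", "G4", "G5"):
--             c1 += 1
--         elif s in ("G6", "G7", "G8", "G9"):
--             c2 += 1
--         elif s == "G10":
--             c2 += 1
--             c3 += 1
--         elif s in ("G11", "G12", "G13", "G14"):
--             c3 += 1
--         elif s in ("G15", "G16", "G17", "G18", "G19"):
--             c4 += 1
--         elif s in ("G20", "G21", "G22", "G23", "G24", "G25", "G26", "G27"):
--             c5 += 1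
--         elif s in ("G28", "G29", "G30", "G31"):
--             c6 += 1
--     names = []
--     if c1 >= 3:
--         names.append("Bulai")
--     if c2 >= 3:
--         names.append("Blight")
--     if c3 >= 3:
--         names.append("Leaf Rust")
--     if c4 >= 3:
--         names.append("Burn")
--     if c5 >= 3:
--         names.append("Stem Borer")
--     if c6 >= 3:
--         names.append("Cob Borer")
--     return ", ".join(names) if names else "No disease matches the given symptoms"
-- ===== Notes on version B (the rewrite author's own statement) =====
-- stated objective: alternative
-- what changed: B compiles the fixed rule table into a single pass over selected_symptoms that keeps six integer counters (one per disease, with the shared symptom G10 incrementing two) via an if/elif chain, instead of A's per-disease rescans of the whole symptom list with an inner membership scan; it trades A's table-driven generality for a specialized one-pass matcher.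
import Mathlib
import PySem

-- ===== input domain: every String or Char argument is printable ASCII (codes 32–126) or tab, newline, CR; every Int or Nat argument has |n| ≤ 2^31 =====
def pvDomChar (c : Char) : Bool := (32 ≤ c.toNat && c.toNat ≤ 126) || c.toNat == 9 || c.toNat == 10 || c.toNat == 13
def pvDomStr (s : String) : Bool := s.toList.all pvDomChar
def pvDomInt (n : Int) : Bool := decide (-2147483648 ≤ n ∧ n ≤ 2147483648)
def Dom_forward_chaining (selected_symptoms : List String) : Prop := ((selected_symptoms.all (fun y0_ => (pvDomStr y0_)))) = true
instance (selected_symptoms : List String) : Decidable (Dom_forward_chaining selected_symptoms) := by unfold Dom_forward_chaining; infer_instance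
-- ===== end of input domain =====

-- B compiles the fixed rule table into a single pass with six integer counters
-- (the shared symptom G10 increments two), replacing A's per-disease rescans; same return value.

-- ===== PORT A =====
-- module-level constants used by A (Python module globals)
def pvDiseases : PySem.Dict String String := PySem.Dict.ofList
  [("P001", "Bulai"), ("P002", "Blight"), ("P003", "Leaf Rust"),
   ("P004", "Burn"), ("P005", "Stem Borer"), ("P006", "Cob Borer")]

def pvRules : PySem.Dict String (List String) := PySem.Dict.ofList
  [("P001", ["G1", "G2", "G3", "G4", "G5"]),
   ("P002", ["G6", "G7", "G8", "G9", "G10"]),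
   ("P003", ["G10", "G11", "G12", "G13", "G14"]),
   ("P004", ["G15", "G16", "G17", "G18", "G19"]),
   ("P005", ["G20", "G21", "G22", "G23", "G24", "G25", "G26", "G27"]),
   ("P006", ["G28", "G29", "G30", "G31"])]

def forward_chaining (selected_symptoms : List String) : String :=
  -- for disease, disease_symptoms in rules.items(): count matches, append if >= 3
  let possible_diseases : List String :=
    pvRules.items.foldl (fun acc p =>
      let match_count : Int :=
        selected_symptoms.foldl (fun n symptom => if symptom ∈ p.2 then n + 1 else n) 0
      if 3 ≤ match_count then acc ++ [(pvDiseases.get? p.1).getD ""] else acc) []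
  if possible_diseases ≠ [] then PySem.Str.join ", " possible_diseases
  else "No disease matches the given symptoms"

-- ===== PORT B =====
-- the body of B's single-pass loop: the if/elif chain over one symptom
def fcStep (c : Int × Int × Int × Int × Int × Int) (s : String) :
    Int × Int × Int × Int × Int × Int :=
  let (c1, c2, c3, c4, c5, c6) := c
  if s ∈ ["G1", "G2", "G3", "G4", "G5"] then (c1 + 1, c2, c3, c4, c5, c6)
  else if s ∈ ["G6", "G7", "G8", "G9"] then (c1, c2 + 1, c3, c4, c5, c6)
  else if s = "G10" then (c1, c2 + 1, c3 + 1, c4, c5, c6)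
  else if s ∈ ["G11", "G12", "G13", "G14"] then (c1, c2, c3 + 1, c4, c5, c6)
  else if s ∈ ["G15", "G16", "G17", "G18", "G19"] then (c1, c2, c3, c4 + 1, c5, c6)
  else if s ∈ ["G20", "G21", "G22", "G23", "G24", "G25", "G26", "G27"] then (c1, c2, c3, c4, c5 + 1, c6)
  else if s ∈ ["G28", "G29", "G30", "G31"] then (c1, c2, c3, c4, c5, c6 + 1)
  else (c1, c2, c3, c4, c5, c6)

def forward_chaining_alt (selected_symptoms : List String) : String :=
  let (c1, c2, c3, c4, c5, c6) :=
    selected_symptoms.foldl fcStep ((0 : Int), 0, 0, 0, 0, 0)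
  let names : List String :=
    (if 3 ≤ c1 then ["Bulai"] else []) ++
    (if 3 ≤ c2 then ["Blight"] else []) ++
    (if 3 ≤ c3 then ["Leaf Rust"] else []) ++
    (if 3 ≤ c4 then ["Burn"] else []) ++
    (if 3 ≤ c5 then ["Stem Borer"] else []) ++
    (if 3 ≤ c6 then ["Cob Borer"] else [])
  if names ≠ [] then PySem.Str.join ", " names
  else "No disease matches the given symptoms"

-- ===== PRECONDITION & SPEC =====
def Spec_forward_chaining (selected_symptoms : List String) (out : String) : Prop := out = forward_chaining_alt selected_symptoms
instance (selected_symptoms : List String) (out : String) : Decidable (Spec_forward_chaining selected_symptoms out) := by unfold Spec_forward_chaining; infer_instance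

-- ===== CLAIM (what is proved, stated in full; the proofs are below) =====
def Claim_equal_forward_chaining : Prop := ∀ (selected_symptoms : List String), Dom_forward_chaining selected_symptoms → Spec_forward_chaining selected_symptoms (forward_chaining selected_symptoms)

-- ===== LEMMAS AND PROOFS =====

-- indicator of membership, as an Int
def pvInd (s : String) (L : List String) : Int := if s ∈ L then 1 else 0

-- one step of B's loop increments exactly the counters of the rules containing s
theorem fcStep_eq (c : Int × Int × Int × Int × Int × Int) (s : String) :
    fcStep c s =
      (c.1 + pvInd s ["G1", "G2", "G3", "G4", "G5"],
       c.2.1 + pvInd s ["G6", "G7", "G8", "G9", "G10"],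
       c.2.2.1 + pvInd s ["G10", "G11", "G12", "G13", "G14"],
       c.2.2.2.1 + pvInd s ["G15", "G16", "G17", "G18", "G19"],
       c.2.2.2.2.1 + pvInd s ["G20", "G21", "G22", "G23", "G24", "G25", "G26", "G27"],
       c.2.2.2.2.2 + pvInd s ["G28", "G29", "G30", "G31"]) := by
  obtain ⟨c1, c2, c3, c4, c5, c6⟩ := c
  unfold fcStep
  split_ifs with h1 h2 h3 h4 h5 h6 h7 <;>
    [ (simp only [List.mem_cons, List.not_mem_nil, or_false] at h1;
       rcases h1 with rfl | rfl | rfl | rfl | rfl <;> simp [pvInd]);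
      (simp only [List.mem_cons, List.not_mem_nil, or_false] at h2;
       rcases h2 with rfl | rfl | rfl | rfl <;> simp [pvInd]);
      (subst h3; simp [pvInd]);
      (simp only [List.mem_cons, List.not_mem_nil, or_false] at h4;
       rcases h4 with rfl | rfl | rfl | rfl <;> simp_all [pvInd]);
      (simp only [List.mem_cons, List.not_mem_nil, or_false] at h5;
       rcases h5 with rfl | rfl | rfl | rfl | rfl <;> simp [pvInd]);
      (simp only [List.mem_cons, List.not_mem_nil, or_false] at h6;
       rcases h6 with rfl | rfl | rfl | rfl | rfl | rfl | rfl | rfl <;> simp [pvInd]);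
      (simp only [List.mem_cons, List.not_mem_nil, or_false] at h7;
       rcases h7 with rfl | rfl | rfl | rfl <;> simp [pvInd]);
      simp_all [pvInd] ]

-- A's inner count as an Int-valued function
def pvCnt (sel : List String) (L : List String) : Int :=
  sel.foldl (fun n symptom => if symptom ∈ L then n + 1 else n) 0

theorem pvCnt_cons (s : String) (rest L : List String) :
    pvCnt (s :: rest) L = pvInd s L + pvCnt rest L := by
  unfold pvCnt pvInd
  rw [PySem.List.foldl_ite_add_one, PySem.List.foldl_ite_add_one, List.countP_cons]
  split_ifs <;> simp_all <;> omega

-- B's loop computes the six match counts of A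
theorem fcLoop_eq : ∀ (sel : List String) (c : Int × Int × Int × Int × Int × Int),
    sel.foldl fcStep c =
      (c.1 + pvCnt sel ["G1", "G2", "G3", "G4", "G5"],
       c.2.1 + pvCnt sel ["G6", "G7", "G8", "G9", "G10"],
       c.2.2.1 + pvCnt sel ["G10", "G11", "G12", "G13", "G14"],
       c.2.2.2.1 + pvCnt sel ["G15", "G16", "G17", "G18", "G19"],
       c.2.2.2.2.1 + pvCnt sel ["G20", "G21", "G22", "G23", "G24", "G25", "G26", "G27"],
       c.2.2.2.2.2 + pvCnt sel ["G28", "G29", "G30", "G31"]) := by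
  intro sel
  induction sel with
  | nil => intro c; simp [pvCnt]
  | cons s rest ih =>
    intro c
    simp only [List.foldl_cons, ih, fcStep_eq, pvCnt_cons]
    refine Prod.ext ?_ (Prod.ext ?_ (Prod.ext ?_ (Prod.ext ?_ (Prod.ext ?_ ?_)))) <;> simp <;> ring

-- ===== VERDICT (by name: the statement is the Claim_ definition above) =====
theorem forward_chaining_spec : Claim_equal_forward_chaining := by
  intro sel _
  unfold Spec_forward_chaining forward_chaining forward_chaining_alt
  rw [show pvRules.items =
    [("P001", ["G1", "G2", "G3", "G4", "G5"]),
     ("P002", ["G6", "G7", "G8", "G9", "G10"]),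
     ("P003", ["G10", "G11", "G12", "G13", "G14"]),
     ("P004", ["G15", "G16", "G17", "G18", "G19"]),
     ("P005", ["G20", "G21", "G22", "G23", "G24", "G25", "G26", "G27"]),
     ("P006", ["G28", "G29", "G30", "G31"])] from by decide,
    fcLoop_eq sel ((0 : Int), 0, 0, 0, 0, 0)]
  simp only [List.foldl_cons, List.foldl_nil, zero_add]
  rw [show (pvDiseases.get? "P001").getD "" = "Bulai" from by decide,
      show (pvDiseases.get? "P002").getD "" = "Blight" from by decide,
      show (pvDiseases.get? "P003").getD "" = "Leaf Rust" from by decide,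
      show (pvDiseases.get? "P004").getD "" = "Burn" from by decide,
      show (pvDiseases.get? "P005").getD "" = "Stem Borer" from by decide,
      show (pvDiseases.get? "P006").getD "" = "Cob Borer" from by decide]
  unfold pvCnt
  generalize List.foldl (fun n symptom => if symptom ∈ ["G1", "G2", "G3", "G4", "G5"] then n + 1 else n) (0 : Int) sel = n1
  generalize List.foldl (fun n symptom => if symptom ∈ ["G6", "G7", "G8", "G9", "G10"] then n + 1 else n) (0 : Int) sel = n2
  generalize List.foldl (fun n symptom => if symptom ∈ ["G10", "G11", "G12", "G13", "G14"] then n + 1 else n) (0 : Int) sel = n3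
  generalize List.foldl (fun n symptom => if symptom ∈ ["G15", "G16", "G17", "G18", "G19"] then n + 1 else n) (0 : Int) sel = n4
  generalize List.foldl (fun n symptom => if symptom ∈ ["G20", "G21", "G22", "G23", "G24", "G25", "G26", "G27"] then n + 1 else n) (0 : Int) sel = n5
  generalize List.foldl (fun n symptom => if symptom ∈ ["G28", "G29", "G30", "G31"] then n + 1 else n) (0 : Int) sel = n6
  by_cases h1 : (3 : Int) ≤ n1 <;> by_cases h2 : (3 : Int) ≤ n2 <;> by_cases h3 : (3 : Int) ≤ n3 <;>
    by_cases h4 : (3 : Int) ≤ n4 <;> by_cases h5 : (3 : Int) ≤ n5 <;> by_cases h6 : (3 : Int) ≤ n6 <;>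
    (try simp only [h1, h2, h3, h4, h5, h6, if_true, if_false]) <;> rfl
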